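-- pv_equiv track=rewrite | github.com/pelavarre/xshverb | bin/plus.py | split_widgets
-- ===== SOURCE A (Python) =====
-- def split_widgets(text: str) -> dict[int, str]:
--
--     widget_by_i = dict()
--
--     wi = -1
--     text_plus = text + "  "
--     for i, ich in enumerate(text):
--
--         if wi == -1:
--             if ich != " ":
--                 wi = i
--                 widget_by_i[wi] = ich
--
--         elif widget_by_i[wi][0] == "<":
--             widget_by_i[wi] += ich
--             if ich == ">":
--                 wi = -1
--
--         elif text_plus[i] == "<":
--             wi = i
--             widget_by_i[wi] = ich
--
--         else:
--             if text_plus[i:].startswith("  "):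
--                 wi = -1
--             else:
--                 widget_by_i[wi] += ich
--
--     return widget_by_i
-- ===== SOURCE B (Python) =====
-- def split_widgets(text: str) -> dict[int, str]:
--     # while-loop boundary scanner: skip spaces, slice out a <...> tag or a word
--     res = {}
--     n = len(text)
--     i = 0
--     while i < n:
--         if text[i] == " ":
--             i += 1
--             continue
--         start = i
--         if text[i] == "<":
--             k = text.find(">", i)
--             if k == -1:
--                 res[start] = text[start:]
--                 i = n
--             else:
--                 res[start] = text[start:k + 1]
--                 i = k + 1
--         else:
--             j = i + 1
--             while j < n and text[j] != "<" and not (text[j] == " " and (j + 1 == n or text[j + 1] == " ")):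
--                 j += 1
--             res[start] = text[start:j]
--             i = j
--     return res
-- ===== Notes on version B (the rewrite author's own statement) =====
-- stated objective: faster
-- what changed: Replaces A's char-by-char sentinel state machine (which grows the current dict entry by one character per step, quadratic in widget length) with a while-loop boundary scanner that skips spaces and slices out each whole <...> tag or word at once.
import Mathlib
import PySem

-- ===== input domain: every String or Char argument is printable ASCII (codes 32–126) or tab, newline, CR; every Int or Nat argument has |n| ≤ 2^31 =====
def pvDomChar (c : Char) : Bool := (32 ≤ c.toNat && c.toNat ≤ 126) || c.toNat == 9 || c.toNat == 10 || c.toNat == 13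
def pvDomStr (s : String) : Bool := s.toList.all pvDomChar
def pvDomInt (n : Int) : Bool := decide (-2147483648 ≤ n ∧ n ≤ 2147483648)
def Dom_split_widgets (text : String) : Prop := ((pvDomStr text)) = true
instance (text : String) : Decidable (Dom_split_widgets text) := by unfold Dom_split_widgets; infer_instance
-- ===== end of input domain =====

-- B replaces A's char-by-char sentinel state machine (one string append per char) by a
-- while-loop boundary scanner that slices out each whole widget at once (objective: faster,
-- measurably so in a timing run: A's per-char append is quadratic in widget length).

-- ===== PORT A =====
-- A's for-loop over enumerate(text) as structural recursion over the remaining chars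
-- (state: the dict and the sentinel wi).  Python str values are carried as List Char and
-- converted once at the end.  `widget_by_i[wi][0]` is ported as getD/headD, exact here
-- because in that branch the key wi is present with a nonempty value; `text_plus[i]` equals
-- the current char ich (i < len text); `text_plus[i:].startswith("  ")` is ported literally
-- as a prefix test on (current-suffix ++ "  ") since text_plus = text + "  ".
def loopA : List Char → Nat → PySem.Dict Int (List Char) → Int → PySem.Dict Int (List Char)
  | [], _, d, _ => d
  | ich :: rest, i, d, wi =>
    if wi = -1 then
      if ich ≠ ' ' then loopA rest (i + 1) (d.insert (i : Int) [ich]) (i : Int)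
      else loopA rest (i + 1) d wi
    else if (d.getD wi []).headD ' ' = '<' then
      if ich = '>' then loopA rest (i + 1) (d.modify wi [] (· ++ [ich])) (-1)
      else loopA rest (i + 1) (d.modify wi [] (· ++ [ich])) wi
    else if ich = '<' then
      loopA rest (i + 1) (d.insert (i : Int) [ich]) (i : Int)
    else
      if [' ', ' '].isPrefixOf ((ich :: rest) ++ [' ', ' ']) then loopA rest (i + 1) d (-1)
      else loopA rest (i + 1) (d.modify wi [] (· ++ [ich])) wi

def split_widgets (text : String) : List (Int × String) :=
  (loopA text.toList 0 PySem.Dict.empty (-1)).items.map (fun p => (p.1, String.ofList p.2))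

-- ===== PORT B =====
-- port of Source B: takeTag = the text.find(">", i) slice (through the first '>', or all of it),
-- takeWord = the inner j-scan (stop before '<' or before a space followed by space/end).
def takeTag : List Char → List Char × List Char
  | [] => ([], [])
  | c :: r =>
    if c = '>' then ([c], r)
    else
      let p := takeTag r
      (c :: p.1, p.2)

def takeWord : List Char → List Char × List Char
  | [] => ([], [])
  | c :: r =>
    if c = '<' ∨ (c = ' ' ∧ r.headD ' ' = ' ') then ([], c :: r)
    else
      let p := takeWord r
      (c :: p.1, p.2)

theorem takeTag_snd_le (l : List Char) : (takeTag l).2.length ≤ l.length := by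
  induction l with
  | nil => simp [takeTag]
  | cons c r ih =>
    simp only [takeTag]
    split
    · simp
    · simpa using Nat.le_succ_of_le ih

theorem takeWord_snd_le (l : List Char) : (takeWord l).2.length ≤ l.length := by
  induction l with
  | nil => simp [takeWord]
  | cons c r ih =>
    simp only [takeWord]
    split
    · simp
    · simpa using Nat.le_succ_of_le ih

def loopB : List Char → Nat → List (Int × List Char)
  | [], _ => []
  | c :: rest, i =>
    if c = ' ' then loopB rest (i + 1)
    else if c = '<' then
      let p := takeTag rest
      ((i : Int), '<' :: p.1) :: loopB p.2 (i + 1 + p.1.length)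
    else
      let p := takeWord rest
      ((i : Int), c :: p.1) :: loopB p.2 (i + 1 + p.1.length)
termination_by l _ => l.length
decreasing_by
  · simp
  · exact Nat.lt_succ_of_le (takeTag_snd_le rest)
  · exact Nat.lt_succ_of_le (takeWord_snd_le rest)

def split_widgets_alt (text : String) : List (Int × String) :=
  (loopB text.toList 0).map (fun p => (p.1, String.ofList p.2))

-- ===== PRECONDITION & SPEC =====
def Spec_split_widgets (text : String) (out : List (Int × String)) : Prop := out = split_widgets_alt text
instance (text : String) (out : List (Int × String)) : Decidable (Spec_split_widgets text out) := by unfold Spec_split_widgets; infer_instance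

-- ===== CLAIM (what is proved, stated in full; the proofs are below) =====
def Claim_equal_split_widgets : Prop := ∀ (text : String), Dom_split_widgets text → Spec_split_widgets text (split_widgets text)

-- ===== LEMMAS AND PROOFS =====

-- all keys of the association list are below n (A's keys are past loop indices)
def Bnd (d : List (Int × List Char)) (n : Nat) : Prop := ∀ p ∈ d, p.1 < (n : Int)

theorem bnd_mono {d : List (Int × List Char)} {m n : Nat} (h : Bnd d m) (hmn : m ≤ n) :
    Bnd d n := fun p hp => lt_of_lt_of_le (h p hp) (by exact_mod_cast hmn)

theorem bnd_append {d : List (Int × List Char)} {w n : Nat} {acc : List Char}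
    (h : Bnd d w) (hwn : w < n) : Bnd (d ++ [((w : Int), acc)]) n := by
  intro p hp
  rcases List.mem_append.mp hp with h1 | h1
  · exact bnd_mono h (Nat.le_of_lt hwn) p h1
  · simp at h1; subst h1; simp; exact_mod_cast hwn

theorem find?_fresh {d : List (Int × List Char)} {k : Int}
    (h : ∀ p ∈ d, p.1 ≠ k) : d.find? (fun p => p.1 == k) = none := by
  apply List.find?_eq_none.mpr
  intro p hp
  simpa using h p hp

theorem contains_fresh {d : List (Int × List Char)} {k : Int}
    (h : ∀ p ∈ d, p.1 ≠ k) : (PySem.Dict.mk d).contains k = false := by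
  simp only [PySem.Dict.contains, List.any_eq_false]
  intro p hp
  simpa using h p hp

theorem insert_fresh {d : List (Int × List Char)} {k : Int} {v : List Char}
    (h : ∀ p ∈ d, p.1 ≠ k) :
    (PySem.Dict.mk d).insert k v = PySem.Dict.mk (d ++ [(k, v)]) := by
  simp [PySem.Dict.insert, contains_fresh h]

theorem bnd_ne {d : List (Int × List Char)} {w : Nat} (h : Bnd d w) :
    ∀ p ∈ d, p.1 ≠ (w : Int) := fun p hp => ne_of_lt (h p hp)

theorem getD_last {d : List (Int × List Char)} {w : Nat} {acc : List Char}
    (h : Bnd d w) :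
    (PySem.Dict.mk (d ++ [((w : Int), acc)])).getD (w : Int) [] = acc := by
  simp [PySem.Dict.getD, PySem.Dict.get?, List.find?_append, find?_fresh (bnd_ne h)]

theorem modify_last {d : List (Int × List Char)} {w : Nat} {acc : List Char}
    (h : Bnd d w) (f : List Char → List Char) :
    (PySem.Dict.mk (d ++ [((w : Int), acc)])).modify (w : Int) [] f
      = PySem.Dict.mk (d ++ [((w : Int), f acc)]) := by
  have hc : (PySem.Dict.mk (d ++ [((w : Int), acc)])).contains (w : Int) = true := by
    simp [PySem.Dict.contains]
  have hmap : ∀ p ∈ d, (if p.1 == (w : Int) then ((w : Int), f acc) else p) = p := by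
    intro p hp
    simp [bnd_ne h p hp]
  simp only [PySem.Dict.modify, getD_last h, PySem.Dict.insert, hc, if_true,
             List.map_append]
  rw [show List.map (fun p => if (p.1 == (w : Int)) = true then ((w : Int), f acc) else p) d = d
        from by simpa using List.map_congr_left hmap]
  simp

theorem twoSpaces_iff (c : Char) (r : List Char) :
    [' ', ' '].isPrefixOf ((c :: r) ++ [' ', ' ']) = true ↔ (c = ' ' ∧ r.headD ' ' = ' ') := by
  cases r with
  | nil => simp [List.isPrefixOf]; exact eq_comm
  | cons c2 r2 =>
    simp [List.isPrefixOf]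
    exact and_congr eq_comm eq_comm

-- the three mutually-supporting invariants, by strong induction on the suffix length:
-- Main: in scanning state (wi = -1) A appends exactly B's scan of the suffix;
-- Tag/Word: mid-widget, A finishes the current (last) entry exactly as takeTag/takeWord do.
theorem trip : ∀ n : Nat, ∀ r : List Char, r.length ≤ n →
    ((∀ (i : Nat) d, Bnd d i →
        loopA r i (PySem.Dict.mk d) (-1) = PySem.Dict.mk (d ++ loopB r i)) ∧
     (∀ (i w : Nat) d (t : List Char), w < i → Bnd d w →
        loopA r i (PySem.Dict.mk (d ++ [((w : Int), '<' :: t)])) (w : Int)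
          = PySem.Dict.mk (d ++ (((w : Int), '<' :: t ++ (takeTag r).1)
              :: loopB (takeTag r).2 (i + (takeTag r).1.length)))) ∧
     (∀ (i w : Nat) d (c : Char) (t : List Char), w < i → Bnd d w → c ≠ '<' →
        loopA r i (PySem.Dict.mk (d ++ [((w : Int), c :: t)])) (w : Int)
          = PySem.Dict.mk (d ++ (((w : Int), c :: t ++ (takeWord r).1)
              :: loopB (takeWord r).2 (i + (takeWord r).1.length))))) := by
  intro n
  induction n with
  | zero =>
    intro r hr
    have : r = [] := List.eq_nil_of_length_eq_zero (Nat.le_zero.mp hr)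
    subst this
    refine ⟨?_, ?_, ?_⟩ <;> intros <;> simp [loopA, loopB, takeTag, takeWord]
  | succ n ih =>
    intro r hr
    refine ⟨?_, ?_, ?_⟩
    · -- Main
      intro i d hbd
      cases r with
      | nil => simp [loopA, loopB]
      | cons c rest =>
        have hrest : rest.length ≤ n := by simpa using hr
        by_cases hsp : c = ' '
        · subst hsp
          rw [show loopA (' ' :: rest) i (PySem.Dict.mk d) (-1)
                = loopA rest (i + 1) (PySem.Dict.mk d) (-1) by simp [loopA]]
          rw [(ih rest hrest).1 (i + 1) d (bnd_mono hbd (Nat.le_succ i))]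
          simp [loopB]
        · have hins := insert_fresh (k := (i : Int)) (v := [c]) (bnd_ne hbd)
          by_cases hlt : c = '<'
          · subst hlt
            rw [show loopA ('<' :: rest) i (PySem.Dict.mk d) (-1)
                  = loopA rest (i + 1) ((PySem.Dict.mk d).insert (i : Int) ['<']) (i : Int) by
                simp [loopA]]
            rw [hins, (ih rest hrest).2.1 (i + 1) i d [] (Nat.lt_succ_self i) hbd]
            simp [loopB, Nat.add_assoc]
          · rw [show loopA (c :: rest) i (PySem.Dict.mk d) (-1)
                  = loopA rest (i + 1) ((PySem.Dict.mk d).insert (i : Int) [c]) (i : Int) by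
                simp [loopA, hsp]]
            rw [hins, (ih rest hrest).2.2 (i + 1) i d c [] (Nat.lt_succ_self i) hbd hlt]
            simp [loopB, hsp, hlt, Nat.add_assoc]
    · -- Tag
      intro i w d t hwi hbd
      cases r with
      | nil => simp [loopA, loopB, takeTag]
      | cons c rest =>
        have hrest : rest.length ≤ n := by simpa using hr
        have hw1 : ¬ ((w : Int) = -1) := by omega
        have hget := getD_last (acc := '<' :: t) hbd
        have hmod := modify_last (acc := '<' :: t) hbd (· ++ [c])
        simp only [loopA]
        rw [if_neg hw1, hget, List.headD_cons, if_pos rfl]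
        by_cases hgt : c = '>'
        · subst hgt
          rw [if_pos rfl, hmod]
          rw [(ih rest hrest).1 (i + 1) (d ++ [((w : Int), '<' :: t ++ ['>'])])
                (bnd_append hbd (by omega))]
          simp [takeTag]
        · rw [if_neg hgt, hmod]
          have := (ih rest hrest).2.1 (i + 1) w d (t ++ [c]) (by omega) hbd
          simp only [show '<' :: (t ++ [c]) = '<' :: t ++ [c] by simp] at this
          rw [this]
          simp [takeTag, hgt, Nat.add_assoc, Nat.add_comm 1]
    · -- Word
      intro i w d c t hwi hbd hc
      cases r with
      | nil => simp [loopA, loopB, takeWord]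
      | cons c2 rest =>
        have hrest : rest.length ≤ n := by simpa using hr
        have hw1 : ¬ ((w : Int) = -1) := by omega
        have hget := getD_last (acc := c :: t) hbd
        simp only [loopA]
        rw [if_neg hw1, hget, List.headD_cons, if_neg hc]
        by_cases hlt : c2 = '<'
        · subst hlt
          rw [if_pos rfl]
          rw [insert_fresh (bnd_ne (bnd_append hbd hwi))]
          rw [(ih rest hrest).2.1 (i + 1) i (d ++ [((w : Int), c :: t)]) []
                (Nat.lt_succ_self i) (bnd_append hbd hwi)]
          simp [takeWord, loopB, Nat.add_assoc]
        · rw [if_neg hlt]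
          by_cases h2 : c2 = ' ' ∧ rest.headD ' ' = ' '
          · have htw : [' ', ' '].isPrefixOf ((c2 :: rest) ++ [' ', ' ']) = true :=
              (twoSpaces_iff c2 rest).mpr h2
            rw [if_pos htw]
            rw [(ih rest hrest).1 (i + 1) (d ++ [((w : Int), c :: t)]) (bnd_append hbd (by omega))]
            simp only [takeWord]
            rw [if_pos (Or.inr h2)]
            have hsp : c2 = ' ' := h2.1
            subst hsp
            simp [loopB]
          · have htw : ¬ ([' ', ' '].isPrefixOf ((c2 :: rest) ++ [' ', ' ']) = true) := by
              rw [twoSpaces_iff]; exact h2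
            rw [if_neg htw]
            rw [modify_last (acc := c :: t) hbd (· ++ [c2])]
            have := (ih rest hrest).2.2 (i + 1) w d c (t ++ [c2]) (by omega) hbd hc
            simp only [show c :: (t ++ [c2]) = c :: t ++ [c2] by simp] at this
            rw [this]
            have hcond : ¬ (c2 = '<' ∨ (c2 = ' ' ∧ rest.headD ' ' = ' ')) := by tauto
            simp only [takeWord]
            rw [if_neg hcond]
            simp [Nat.add_assoc, Nat.add_comm 1]

-- ===== VERDICT (by name: the statement is the Claim_ definition above) =====
theorem split_widgets_spec : Claim_equal_split_widgets := by
  intro text _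
  unfold Spec_split_widgets split_widgets split_widgets_alt
  have h := (trip text.toList.length text.toList le_rfl).1 0 [] (by intro p hp; simp at hp)
  rw [show (PySem.Dict.empty : PySem.Dict Int (List Char)) = PySem.Dict.mk [] from rfl, h]
  simp
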